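-- pv_equiv track=rewrite | github.com/SANAT-01/Card-Game | card_bot.py | maxi2
-- ===== SOURCE A (Python) =====
-- prior2 = ["2","3","4","5","6","7","8","9","10","J","Q","K","A"]     # priority order for the each types of cards
--
-- def check(value,lst): # to check whether that given type of card is present or not and return Ture or False
--     value2 = False
--     for y in lst:
--         if value in y:
--             value2 = True
--             break
--     return value2
--
-- def maxi2(l,suit): # to find the highest card of same suit
--     count = 0
--     m = -1
--     maximum = ""
--     val = ""
--     if check(suit,l):
--         val = suit
--     else:
--         return mini(l)
--
--     for x in l:
--         if val in x :
--             if prior2.index(x[1:]) > m: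
--                 maximum = x
--                 m = prior2.index(x[1:])
--
--             else:
--                 continue
--     return maximum
--
-- def mini(l): # to find the lowest valued card within the player
--     count = 0
--     n = 13
--     mnimum = ""
--     val = ""
--     if check("C",l):
--         val = "C"
--     elif check("D",l):
--         val = "D"
--     elif check("H",l):
--         val = "H"
--     elif check("S",l):
--         val = "S"
--     else:
--         pass
--
--     for x in l:
--         if val in x :
--             if prior2.index(x[1:])<n:
--                 minimum = x
--                 n = prior2.index(x[1:])
--
--             else:
--                 continue
--     return minimum
-- ===== SOURCE B (Python) =====
-- prior2 = ["2","3","4","5","6","7","8","9","10","J","Q","K","A"]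
--
--
-- def maxi2(l, suit):
--     # Table-driven scan: walk the rank table itself (highest-first for the suit,
--     # lowest-first for the fallback suit) and return the first card of the chosen
--     # suit whose rank text equals the table entry.  No index() calls, no running
--     # best/accumulator.
--     if any(suit in x for x in l):
--         pick, ranks = suit, reversed(prior2)
--     else:
--         pick = next((s for s in "CDHS" if any(s in x for x in l)), "")
--         ranks = prior2
--     for r in ranks:
--         for x in l:
--             if pick in x and x[1:] == r:
--                 return x
-- ===== Notes on version B (the rewrite author's own statement) =====
-- stated objective: alternative
-- what changed: B searches the 13-entry rank table itself (highest-first for the suit, lowest-first for the fallback suit) and returns the first card whose rank text equals the table entry, replacing A's prior2.index-and-running-best scans (check + max loop, and mini's separate suit chain + min loop).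
-- outside the precondition, e.g. on maxi2(['C9', 'Cx'], 'C'): A raises ValueError, B returns 'C9'; on maxi2([], 'C'): A raises NameError, B returns None
import Mathlib
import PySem

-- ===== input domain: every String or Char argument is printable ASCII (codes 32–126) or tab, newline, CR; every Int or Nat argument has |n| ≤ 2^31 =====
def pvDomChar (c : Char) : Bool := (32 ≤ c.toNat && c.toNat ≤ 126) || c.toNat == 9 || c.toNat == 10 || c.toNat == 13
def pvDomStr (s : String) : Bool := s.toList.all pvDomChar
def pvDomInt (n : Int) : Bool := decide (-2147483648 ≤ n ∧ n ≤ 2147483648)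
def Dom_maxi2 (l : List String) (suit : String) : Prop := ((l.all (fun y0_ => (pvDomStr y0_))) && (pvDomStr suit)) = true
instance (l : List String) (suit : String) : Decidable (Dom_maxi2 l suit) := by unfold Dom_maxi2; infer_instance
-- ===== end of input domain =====

-- B replaces A's index-and-running-max scans (check + max loop, and mini's min loop) by a
-- table-driven search: walk the 13-entry rank table itself (highest-first, or lowest-first
-- on the fallback) and return the first card whose rank text equals the table entry.

-- module constant shared by both Pythons
def prior2 : List String := ["2","3","4","5","6","7","8","9","10","J","Q","K","A"]

-- x[1:] as a String (PySem.List.slice on the char list)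
def tailS (x : String) : String := String.ofList (PySem.List.slice x.toList (some 1) none)

-- prior2.index(x[1:]) as an Int; `getD 0` stands for the ValueError Python raises when
-- x[1:] is not a rank — Pre_ excludes those inputs.
def keyI (x : String) : Int := ((PySem.List.index? prior2 (tailS x)).getD 0 : Nat)

-- ===== PORT A =====
def check (value : String) : List String → Bool
  | [] => false
  | y :: t => if PySem.Str.isIn value y then true else check value t

-- A's mini: the uninitialised `minimum` (NameError when no card matches val) is rendered
-- as the initial "" of the fold state; Pre_ excludes those inputs.
def mini (l : List String) : String :=
  let val : String :=
    if check "C" l then "C"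
    else if check "D" l then "D"
    else if check "H" l then "H"
    else if check "S" l then "S"
    else ""
  (l.foldl (fun (st : String × Int) x =>
      if PySem.Str.isIn val x then
        if keyI x < st.2 then (x, keyI x) else st
      else st) ("", 13)).1

def maxi2 (l : List String) (suit : String) : String :=
  if check suit l then
    (l.foldl (fun (st : String × Int) x =>
        if PySem.Str.isIn suit x then
          if keyI x > st.2 then (x, keyI x) else st
        else st) ("", -1)).1
  else mini l

-- ===== PORT B =====
-- B: pick the suit letter and the scan order of the rank table, then return the first
-- card equal to a table rank; falling off the loop (Python's implicit None) is `getD ""`,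
-- reached only outside Pre_.
def maxi2_alt (l : List String) (suit : String) : String :=
  let pr : String × List String :=
    if l.any (fun x => PySem.Str.isIn suit x) then (suit, prior2.reverse)
    else (((["C", "D", "H", "S"].find? (fun s => l.any (fun x => PySem.Str.isIn s x))).getD ""),
          prior2)
  (pr.2.findSome? (fun r => l.find? (fun x => PySem.Str.isIn pr.1 x && (tailS x == r)))).getD ""

-- ===== PRECONDITION & SPEC =====
-- the suit letter mini selects (C, D, H, S in order of presence, else "")
def pvVal (l : List String) : String :=
  if l.any (fun x => PySem.Str.isIn "C" x) then "C"
  else if l.any (fun x => PySem.Str.isIn "D" x) then "D"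
  else if l.any (fun x => PySem.Str.isIn "H" x) then "H"
  else if l.any (fun x => PySem.Str.isIn "S" x) then "S"
  else ""

-- Pre_ excludes exactly the inputs on which Python A raises: a card matching the scanned
-- suit whose x[1:] is not a rank (ValueError from prior2.index), and — on the mini fallback —
-- a hand with no card matching mini's selected suit (NameError from the unassigned `minimum`).
def Pre_maxi2 (l : List String) (suit : String) : Prop :=
  if l.any (fun x => PySem.Str.isIn suit x) then
    ∀ x ∈ l, PySem.Str.isIn suit x = true → tailS x ∈ prior2
  else
    (∃ x ∈ l, PySem.Str.isIn (pvVal l) x = true) ∧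
    ∀ x ∈ l, PySem.Str.isIn (pvVal l) x = true → tailS x ∈ prior2

instance (l : List String) (suit : String) : Decidable (Pre_maxi2 l suit) := by
  unfold Pre_maxi2; infer_instance

def pvWitness_maxi2 : List String × String := (["C2", "C10", "D5"], "C")

def Spec_maxi2 (l : List String) (suit : String) (out : String) : Prop := out = maxi2_alt l suit
instance (l : List String) (suit : String) (out : String) : Decidable (Spec_maxi2 l suit out) := by unfold Spec_maxi2; infer_instance

-- ===== CLAIM (what is proved, stated in full; the proofs are below) =====
def Claim_equal_maxi2 : Prop := ∀ (l : List String) (suit : String), Dom_maxi2 l suit → Pre_maxi2 l suit → Spec_maxi2 l suit (maxi2 l suit)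

-- ===== LEMMAS AND PROOFS =====

theorem check_eq_any (value : String) (l : List String) :
    check value l = l.any (fun x => PySem.Str.isIn value x) := by
  induction l with
  | nil => rfl
  | cons y t ih => simp only [check, List.any_cons, ih]; split <;> simp_all

-- A's max-loop body and min-loop body, named for the proofs
def sMax (st : String × Int) (x : String) : String × Int :=
  if keyI x > st.2 then (x, keyI x) else st
def sMin (st : String × Int) (x : String) : String × Int :=
  if keyI x < st.2 then (x, keyI x) else st

-- running max / min of keyI starting from m
def MKmax (m : Int) (cs : List String) : Int := cs.foldl (fun a x => max a (keyI x)) m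
def MKmin (m : Int) (cs : List String) : Int := cs.foldl (fun a x => min a (keyI x)) m

theorem keyI_nonneg (x : String) : 0 ≤ keyI x := by unfold keyI; positivity

theorem keyI_lt_13 (x : String) (h : tailS x ∈ prior2) : keyI x < 13 := by
  unfold keyI
  rcases hk : PySem.List.index? prior2 (tailS x) with _ | k
  · rw [PySem.List.index?_eq_none_iff] at hk; exact absurd h hk
  · obtain ⟨hlt, -, -⟩ := PySem.List.getElem_of_index?_eq_some hk
    simp only [Option.getD_some]
    have : prior2.length = 13 := rfl
    omega

theorem MKmax_ge (cs : List String) : ∀ m : Int, m ≤ MKmax m cs := by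
  induction cs with
  | nil => intro m; simp [MKmax]
  | cons x t ih =>
      intro m
      calc m ≤ max m (keyI x) := le_max_left _ _
        _ ≤ _ := ih (max m (keyI x))

theorem MKmax_ge_key (cs : List String) :
    ∀ m : Int, ∀ y ∈ cs, keyI y ≤ MKmax m cs := by
  induction cs with
  | nil => intro m y hy; simp at hy
  | cons x t ih =>
      intro m y hy
      rcases List.mem_cons.mp hy with rfl | hy'
      · calc keyI y ≤ max m (keyI y) := le_max_right _ _
          _ ≤ _ := MKmax_ge t _
      · exact ih (max m (keyI x)) y hy'

theorem MKmax_att (cs : List String) :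
    ∀ m : Int, m < MKmax m cs → ∃ y ∈ cs, keyI y = MKmax m cs := by
  induction cs with
  | nil => intro m h; simp [MKmax] at h
  | cons x t ih =>
      intro m h
      have hrw : MKmax m (x :: t) = MKmax (max m (keyI x)) t := rfl
      by_cases h2 : max m (keyI x) < MKmax (max m (keyI x)) t
      · obtain ⟨y, hy, he⟩ := ih (max m (keyI x)) h2
        exact ⟨y, List.mem_cons_of_mem _ hy, by rw [hrw]; exact he⟩
      · have hle := MKmax_ge t (max m (keyI x))
        have heq : MKmax (max m (keyI x)) t = max m (keyI x) := le_antisymm (by omega) hle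
        rw [hrw] at h ⊢
        rw [heq] at h ⊢
        refine ⟨x, List.mem_cons_self, ?_⟩
        rcases max_choice m (keyI x) with hc | hc <;> omega

theorem MKmin_le (cs : List String) : ∀ m : Int, MKmin m cs ≤ m := by
  induction cs with
  | nil => intro m; simp [MKmin]
  | cons x t ih =>
      intro m
      calc MKmin (min m (keyI x)) t ≤ min m (keyI x) := ih _
        _ ≤ m := min_le_left _ _

theorem MKmin_le_key (cs : List String) :
    ∀ m : Int, ∀ y ∈ cs, MKmin m cs ≤ keyI y := by
  induction cs with
  | nil => intro m y hy; simp at hy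
  | cons x t ih =>
      intro m y hy
      rcases List.mem_cons.mp hy with rfl | hy'
      · calc MKmin (min m (keyI y)) t ≤ min m (keyI y) := MKmin_le t _
          _ ≤ keyI y := min_le_right _ _
      · exact ih (min m (keyI x)) y hy'

theorem MKmin_nonneg (cs : List String) : ∀ m : Int, 0 ≤ m → 0 ≤ MKmin m cs := by
  induction cs with
  | nil => intro m h; simpa [MKmin] using h
  | cons x t ih =>
      intro m h
      have := keyI_nonneg x
      exact ih (min m (keyI x)) (by omega)

theorem MKmin_att (cs : List String) :
    ∀ m : Int, MKmin m cs < m → ∃ y ∈ cs, keyI y = MKmin m cs := by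
  induction cs with
  | nil => intro m h; simp [MKmin] at h
  | cons x t ih =>
      intro m h
      have hrw : MKmin m (x :: t) = MKmin (min m (keyI x)) t := rfl
      by_cases h2 : MKmin (min m (keyI x)) t < min m (keyI x)
      · obtain ⟨y, hy, he⟩ := ih (min m (keyI x)) h2
        exact ⟨y, List.mem_cons_of_mem _ hy, by rw [hrw]; exact he⟩
      · have hle := MKmin_le t (min m (keyI x))
        have heq : MKmin (min m (keyI x)) t = min m (keyI x) := le_antisymm hle (by omega)
        rw [hrw] at h ⊢
        rw [heq] at h ⊢
        refine ⟨x, List.mem_cons_self, ?_⟩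
        rcases min_choice m (keyI x) with hc | hc <;> omega

-- the max loop computes (first card attaining the running max, the running max)
theorem foldl_sMax (cs : List String) :
    ∀ (b : String) (m : Int),
      cs.foldl sMax (b, m)
        = (if m < MKmax m cs then (cs.find? (fun x => keyI x == MKmax m cs)).getD b else b,
           MKmax m cs) := by
  induction cs with
  | nil => intro b m; simp [MKmax]
  | cons x t ih =>
      intro b m
      have hrw : MKmax m (x :: t) = MKmax (max m (keyI x)) t := rfl
      rw [List.foldl_cons]
      by_cases hx : keyI x > m
      · have hst : sMax (b, m) x = (x, keyI x) := by unfold sMax; exact if_pos hx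
        rw [hst, ih x (keyI x), hrw]
        have hmx : max m (keyI x) = keyI x := max_eq_right (le_of_lt hx)
        rw [hmx]
        have hgeM := MKmax_ge t (keyI x)
        have hcond : m < MKmax (keyI x) t := by omega
        rw [if_pos hcond]
        by_cases h2 : keyI x < MKmax (keyI x) t
        · rw [if_pos h2]
          obtain ⟨y, hy, he⟩ := MKmax_att t (keyI x) h2
          obtain ⟨z, hz⟩ : ∃ z, t.find? (fun w => keyI w == MKmax (keyI x) t) = some z :=
            Option.isSome_iff_exists.mp
              (List.find?_isSome.mpr ⟨y, hy, beq_iff_eq.mpr he⟩)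
          have hhead : (keyI x == MKmax (keyI x) t) = false := by
            simp only [beq_eq_false_iff_ne]; omega
          rw [List.find?_cons_of_neg (by simpa using hhead), hz]
          simp
        · have heq : MKmax (keyI x) t = keyI x := le_antisymm (by omega) hgeM
          rw [if_neg h2, heq]
          rw [List.find?_cons_of_pos (by simp)]
          simp
      · have hst : sMax (b, m) x = (b, m) := by unfold sMax; exact if_neg hx
        rw [hst, ih b m, hrw]
        have hmx : max m (keyI x) = m := max_eq_left (by omega)
        rw [hmx]
        by_cases h2 : m < MKmax m t
        · rw [if_pos h2, if_pos h2]
          have hhead : (keyI x == MKmax m t) = false := by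
            simp only [beq_eq_false_iff_ne]; omega
          rw [List.find?_cons_of_neg (by simpa using hhead)]
        · rw [if_neg h2, if_neg h2]

-- the min loop computes (first card attaining the running min, the running min)
theorem foldl_sMin (cs : List String) :
    ∀ (b : String) (m : Int),
      cs.foldl sMin (b, m)
        = (if MKmin m cs < m then (cs.find? (fun x => keyI x == MKmin m cs)).getD b else b,
           MKmin m cs) := by
  induction cs with
  | nil => intro b m; simp [MKmin]
  | cons x t ih =>
      intro b m
      have hrw : MKmin m (x :: t) = MKmin (min m (keyI x)) t := rfl
      rw [List.foldl_cons]
      by_cases hx : keyI x < m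
      · have hst : sMin (b, m) x = (x, keyI x) := by unfold sMin; exact if_pos hx
        rw [hst, ih x (keyI x), hrw]
        have hmx : min m (keyI x) = keyI x := min_eq_right (le_of_lt hx)
        rw [hmx]
        have hleM := MKmin_le t (keyI x)
        have hcond : MKmin (keyI x) t < m := by omega
        rw [if_pos hcond]
        by_cases h2 : MKmin (keyI x) t < keyI x
        · rw [if_pos h2]
          obtain ⟨y, hy, he⟩ := MKmin_att t (keyI x) h2
          obtain ⟨z, hz⟩ : ∃ z, t.find? (fun w => keyI w == MKmin (keyI x) t) = some z :=
            Option.isSome_iff_exists.mp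
              (List.find?_isSome.mpr ⟨y, hy, beq_iff_eq.mpr he⟩)
          have hhead : (keyI x == MKmin (keyI x) t) = false := by
            simp only [beq_eq_false_iff_ne]; omega
          rw [List.find?_cons_of_neg (by simpa using hhead), hz]
          simp
        · have heq : MKmin (keyI x) t = keyI x := le_antisymm hleM (by omega)
          rw [if_neg h2, heq]
          rw [List.find?_cons_of_pos (by simp)]
          simp
      · have hst : sMin (b, m) x = (b, m) := by unfold sMin; exact if_neg hx
        rw [hst, ih b m, hrw]
        have hmx : min m (keyI x) = m := min_eq_left (by omega)
        rw [hmx]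
        by_cases h2 : MKmin m t < m
        · rw [if_pos h2, if_pos h2]
          have hhead : (keyI x == MKmin m t) = false := by
            simp only [beq_eq_false_iff_ne]; omega
          rw [List.find?_cons_of_neg (by simpa using hhead)]
        · rw [if_neg h2, if_neg h2]

theorem find?_guard (p : String → Bool) (l : List String) (r : String) :
    l.find? (fun x => p x && (tailS x == r)) = (l.filter p).find? (fun x => tailS x == r) := by
  induction l with
  | nil => rfl
  | cons x t ih =>
      by_cases hp : p x
      · by_cases hq : (tailS x == r) = true
        · simp [hp, hq]
        · simp [hp, hq, ih]
      · simp [hp, ih]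

theorem find?_congr_mem (p q : String → Bool) (cs : List String)
    (h : ∀ x ∈ cs, p x = q x) : cs.find? p = cs.find? q := by
  induction cs with
  | nil => rfl
  | cons x t ih =>
      have hx := h x List.mem_cons_self
      by_cases hp : p x
      · rw [List.find?_cons_of_pos hp, List.find?_cons_of_pos (hx ▸ hp)]
      · rw [List.find?_cons_of_neg hp, List.find?_cons_of_neg (by rw [← hx]; exact hp),
            ih (fun y hy => h y (List.mem_cons_of_mem _ hy))]

theorem findSome?_skip (f : String → Option String) (rs1 rs2 : List String)
    (h : ∀ r ∈ rs1, f r = none) :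
    (rs1 ++ rs2).findSome? f = rs2.findSome? f := by
  induction rs1 with
  | nil => rfl
  | cons r t ih =>
      rw [List.cons_append, List.findSome?_cons, h r List.mem_cons_self]
      exact ih (fun r hr => h r (List.mem_cons_of_mem _ hr))

theorem nodup_prior2 : prior2.Nodup := by decide

theorem len_prior2 : prior2.length = 13 := rfl

-- keyI x is the unique prior2-index of tailS x (for cards whose tail is a rank)
theorem keyI_spec (x : String) (h : tailS x ∈ prior2) :
    ∃ k : Nat, ∃ hk : k < prior2.length, prior2[k] = tailS x ∧ keyI x = (k : Int) := by
  rcases hk : PySem.List.index? prior2 (tailS x) with _ | k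
  · rw [PySem.List.index?_eq_none_iff] at hk; exact absurd h hk
  · obtain ⟨hlt, hel, -⟩ := PySem.List.getElem_of_index?_eq_some hk
    exact ⟨k, hlt, hel, by unfold keyI; rw [hk]; simp⟩

-- for a card whose tail is a rank, "tail equals the i-th rank" = "key equals i"
theorem tail_beq_iff_key (x : String) (h : tailS x ∈ prior2) (i : Nat) (hi : i < prior2.length) :
    (tailS x == prior2[i]) = (keyI x == (i : Int)) := by
  obtain ⟨k, hk, hel, hkey⟩ := keyI_spec x h
  rw [Bool.eq_iff_iff]
  simp only [beq_iff_eq, hkey]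
  constructor
  · intro he
    have : prior2[k] = prior2[i] := by rw [hel, he]
    have := nodup_prior2.getElem_inj_iff.mp this
    omega
  · intro he
    have : k = i := by omega
    subst this; rw [← hel]

-- cards of the filtered hand never match a rank strictly above the running max
theorem skip_above (cs : List String) (hall : ∀ x ∈ cs, tailS x ∈ prior2)
    (M : Int) (hM : ∀ x ∈ cs, keyI x ≤ M) (r : String) (i : Nat)
    (hr : r ∈ prior2.drop i) (hiM : M < (i : Int)) :
    cs.find? (fun x => tailS x == r) = none := by
  rw [List.find?_eq_none]
  intro x hx hbe
  obtain ⟨j, hj, hjr⟩ := List.mem_iff_getElem.mp hr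
  have hij : i + j < prior2.length := by
    simp at hj; omega
  have hel : prior2[i + j] = r := by
    rw [← List.getElem_drop]; exact hjr
  have hxr : tailS x = r := by simpa using hbe
  obtain ⟨k, hk, helk, hkey⟩ := keyI_spec x (hall x hx)
  have : prior2[k] = prior2[i + j]'hij := by rw [helk, hxr, hel]
  have hk2 := nodup_prior2.getElem_inj_iff.mp this
  have := hM x hx
  omega

-- … and never match a rank strictly below the running min
theorem skip_below (cs : List String) (hall : ∀ x ∈ cs, tailS x ∈ prior2)
    (M : Int) (hM : ∀ x ∈ cs, M ≤ keyI x) (r : String) (i : Nat)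
    (hr : r ∈ prior2.take i) (hiM : (i : Int) ≤ M) :
    cs.find? (fun x => tailS x == r) = none := by
  rw [List.find?_eq_none]
  intro x hx hbe
  obtain ⟨j, hj, hjr⟩ := List.mem_iff_getElem.mp hr
  have hjlen : j < prior2.length := by
    simp at hj; omega
  have hji : j < i := by
    simp at hj; omega
  have hel : prior2[j] = r := by
    rw [← List.getElem_take]; exact hjr
  have hxr : tailS x = r := by simpa using hbe
  obtain ⟨k, hk, helk, hkey⟩ := keyI_spec x (hall x hx)
  have : prior2[k] = prior2[j]'hjlen := by rw [helk, hxr, hel]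
  have hk2 := nodup_prior2.getElem_inj_iff.mp this
  have := hM x hx
  omega

-- descending rank scan = A's max loop (on the filtered hand)
theorem branchMax (cs : List String) (hne : cs ≠ [])
    (hall : ∀ x ∈ cs, tailS x ∈ prior2) :
    (prior2.reverse.findSome? (fun r => cs.find? (fun x => tailS x == r))).getD ""
      = (cs.foldl sMax ("", -1)).1 := by
  obtain ⟨y0, hy0⟩ := List.exists_mem_of_ne_nil cs hne
  have hMge : (-1 : Int) < MKmax (-1) cs := by
    have h1 := MKmax_ge_key cs (-1) y0 hy0
    have h2 := keyI_nonneg y0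
    omega
  obtain ⟨ya, hya, hkeya⟩ := MKmax_att cs (-1) hMge
  set M := MKmax (-1) cs with hMdef
  have hM0 : 0 ≤ M := by have := keyI_nonneg ya; omega
  have hM13 : M < 13 := by
    have := keyI_lt_13 ya (hall ya hya); omega
  set Mn := M.toNat with hMn
  have hMnM : (Mn : Int) = M := Int.toNat_of_nonneg hM0
  have hMn13 : Mn < prior2.length := by rw [len_prior2]; omega
  -- A side
  rw [foldl_sMax cs "" (-1), if_pos hMge]
  -- B side: split the reversed table at index Mn
  have hdecomp : prior2 = prior2.take Mn ++ prior2[Mn] :: prior2.drop (Mn + 1) := by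
    conv_lhs => rw [← List.take_append_drop Mn prior2, List.drop_eq_getElem_cons hMn13]
  have hrev : prior2.reverse
      = (prior2.drop (Mn + 1)).reverse ++ prior2[Mn] :: (prior2.take Mn).reverse := by
    conv_lhs => rw [hdecomp]
    simp
  rw [hrev, findSome?_skip _ _ _ (fun r hr => by
    refine skip_above cs hall M (fun x hx => MKmax_ge_key cs (-1) x hx) r (Mn + 1)
      (List.mem_reverse.mp hr) (by omega))]
  rw [List.findSome?_cons]
  have hfind : cs.find? (fun x => tailS x == prior2[Mn])
      = cs.find? (fun x => keyI x == M) := by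
    refine find?_congr_mem _ _ cs (fun x hx => ?_)
    rw [tail_beq_iff_key x (hall x hx) Mn hMn13, hMnM]
  obtain ⟨z, hz⟩ : ∃ z, cs.find? (fun w => keyI w == M) = some z :=
    Option.isSome_iff_exists.mp
      (List.find?_isSome.mpr ⟨ya, hya, beq_iff_eq.mpr hkeya⟩)
  rw [hfind, hz]

-- ascending rank scan = A's min loop (on the filtered hand)
theorem branchMin (cs : List String) (hne : cs ≠ [])
    (hall : ∀ x ∈ cs, tailS x ∈ prior2) :
    (prior2.findSome? (fun r => cs.find? (fun x => tailS x == r))).getD ""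
      = (cs.foldl sMin ("", 13)).1 := by
  obtain ⟨y0, hy0⟩ := List.exists_mem_of_ne_nil cs hne
  have hMlt : MKmin 13 cs < 13 := by
    have h1 := MKmin_le_key cs 13 y0 hy0
    have h2 := keyI_lt_13 y0 (hall y0 hy0)
    omega
  obtain ⟨ya, hya, hkeya⟩ := MKmin_att cs 13 hMlt
  set M := MKmin 13 cs with hMdef
  have hM0 : 0 ≤ M := MKmin_nonneg cs 13 (by omega)
  set Mn := M.toNat with hMn
  have hMnM : (Mn : Int) = M := Int.toNat_of_nonneg hM0
  have hMn13 : Mn < prior2.length := by rw [len_prior2]; omega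
  -- A side
  rw [foldl_sMin cs "" 13, if_pos hMlt]
  -- B side: split the table at index Mn
  have hdecomp : prior2 = prior2.take Mn ++ prior2[Mn] :: prior2.drop (Mn + 1) := by
    conv_lhs => rw [← List.take_append_drop Mn prior2, List.drop_eq_getElem_cons hMn13]
  conv_lhs => rw [hdecomp]
  rw [findSome?_skip _ _ _ (fun r hr => by
    refine skip_below cs hall M (fun x hx => MKmin_le_key cs 13 x hx) r Mn hr (by omega))]
  rw [List.findSome?_cons]
  have hfind : cs.find? (fun x => tailS x == prior2[Mn])
      = cs.find? (fun x => keyI x == M) := by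
    refine find?_congr_mem _ _ cs (fun x hx => ?_)
    rw [tail_beq_iff_key x (hall x hx) Mn hMn13, hMnM]
  obtain ⟨z, hz⟩ : ∃ z, cs.find? (fun w => keyI w == M) = some z :=
    Option.isSome_iff_exists.mp
      (List.find?_isSome.mpr ⟨ya, hya, beq_iff_eq.mpr hkeya⟩)
  rw [hfind, hz]

-- B's fallback pick (find? over the CDHS table) is mini's val = pvVal
theorem pick_eq_pvVal (l : List String) :
    ((["C", "D", "H", "S"].find? (fun s => l.any (fun x => PySem.Str.isIn s x))).getD "")
      = pvVal l := by
  unfold pvVal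
  cases hC : l.any (fun x => PySem.Str.isIn "C" x) with
  | true =>
    rw [List.find?_cons_of_pos (p := fun s => l.any (fun x => PySem.Str.isIn s x)) hC]
    simp
  | false =>
  rw [List.find?_cons_of_neg (p := fun s => l.any (fun x => PySem.Str.isIn s x))
    (by show ¬(l.any fun x => PySem.Str.isIn "C" x) = true; exact fun h => Bool.false_ne_true (hC ▸ h))]
  cases hD : l.any (fun x => PySem.Str.isIn "D" x) with
  | true =>
    rw [List.find?_cons_of_pos (p := fun s => l.any (fun x => PySem.Str.isIn s x)) hD]
    simp
  | false =>
  rw [List.find?_cons_of_neg (p := fun s => l.any (fun x => PySem.Str.isIn s x))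
    (by show ¬(l.any fun x => PySem.Str.isIn "D" x) = true; exact fun h => Bool.false_ne_true (hD ▸ h))]
  cases hH : l.any (fun x => PySem.Str.isIn "H" x) with
  | true =>
    rw [List.find?_cons_of_pos (p := fun s => l.any (fun x => PySem.Str.isIn s x)) hH]
    simp
  | false =>
  rw [List.find?_cons_of_neg (p := fun s => l.any (fun x => PySem.Str.isIn s x))
    (by show ¬(l.any fun x => PySem.Str.isIn "H" x) = true; exact fun h => Bool.false_ne_true (hH ▸ h))]
  cases hS : l.any (fun x => PySem.Str.isIn "S" x) with
  | true =>
    rw [List.find?_cons_of_pos (p := fun s => l.any (fun x => PySem.Str.isIn s x)) hS]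
    simp
  | false =>
  rw [List.find?_cons_of_neg (p := fun s => l.any (fun x => PySem.Str.isIn s x))
    (by show ¬(l.any fun x => PySem.Str.isIn "S" x) = true; exact fun h => Bool.false_ne_true (hS ▸ h))]
  simp

theorem filter_ne_nil_of_any (p : String → Bool) (l : List String)
    (h : l.any p = true) : l.filter p ≠ [] := by
  obtain ⟨x, hx, hpx⟩ := List.any_eq_true.mp h
  intro hnil
  have : x ∈ l.filter p := List.mem_filter.mpr ⟨hx, hpx⟩
  rw [hnil] at this; simp at this

-- ===== VERDICT (by name: the statement is the Claim_ definition above) =====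
theorem maxi2_spec : Claim_equal_maxi2 := by
  intro l suit _ hpre
  unfold Spec_maxi2 maxi2 maxi2_alt
  rw [check_eq_any]
  unfold Pre_maxi2 at hpre
  by_cases h : l.any (fun x => PySem.Str.isIn suit x) = true
  · rw [if_pos h] at hpre ⊢
    simp only [if_pos h]
    rw [PySem.List.foldl_if_eq_foldl_filter]
    simp only [find?_guard]
    set cs := l.filter (fun x => PySem.Str.isIn suit x) with hcs
    have hall : ∀ x ∈ cs, tailS x ∈ prior2 := by
      intro x hx
      have := List.mem_filter.mp hx
      exact hpre x this.1 this.2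
    have hne : cs ≠ [] := filter_ne_nil_of_any _ l h
    exact (branchMax cs hne hall).symm
  · rw [if_neg h] at hpre ⊢
    simp only [if_neg h]
    obtain ⟨⟨xm, hxm, hxmv⟩, hall0⟩ := hpre
    -- A side: mini
    unfold mini
    simp only [check_eq_any]
    rw [show (if l.any (fun x => PySem.Str.isIn "C" x) then "C"
          else if l.any (fun x => PySem.Str.isIn "D" x) then "D"
          else if l.any (fun x => PySem.Str.isIn "H" x) then "H"
          else if l.any (fun x => PySem.Str.isIn "S" x) then "S" else "") = pvVal l from rfl]
    rw [PySem.List.foldl_if_eq_foldl_filter]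
    -- B side
    rw [pick_eq_pvVal]
    simp only [find?_guard]
    set cs := l.filter (fun x => PySem.Str.isIn (pvVal l) x) with hcs
    have hall : ∀ x ∈ cs, tailS x ∈ prior2 := by
      intro x hx
      have := List.mem_filter.mp hx
      exact hall0 x this.1 this.2
    have hne : cs ≠ [] := by
      intro hnil
      have : xm ∈ cs := List.mem_filter.mpr ⟨hxm, hxmv⟩
      rw [hnil] at this; simp at this
    exact (branchMin cs hne hall).symm
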